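-- pv_equiv track=rewrite | github.com/JRA2002/python_problems | LEETCODE/easy/two_sum_lessK.py | two_sum_less
-- ===== SOURCE A (Python) =====
-- def two_sum_less(A: list, K: int):
--     res = -1
--     A.sort()
--     l = 0
--     r = len(A) - 1
--
--     while l < r:
--         if A[l] + A[r] < K:
--             res = max(res, A[l] + A[r])
--             l += 1
--         else:
--             r -= 1
--
--     return res
-- ===== SOURCE B (Python) =====
-- def two_sum_less(A: list, K: int):
--     # Sort (kept in place for the caller-visible mutation), then for each i binary-search
--     # the suffix for the largest A[j], j > i, with A[i] + A[j] < K.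
--     A.sort()
--     res = -1
--     n = len(A)
--     for i in range(n):
--         x = K - A[i]
--         lo = i + 1
--         hi = n
--         while lo < hi:
--             mid = (lo + hi) // 2
--             if A[mid] < x:
--                 lo = mid + 1
--             else:
--                 hi = mid
--         if i + 1 <= lo - 1:
--             res = max(res, A[i] + A[lo - 1])
--     return res
-- ===== Notes on version B (the rewrite author's own statement) =====
-- stated objective: alternative
-- what changed: Replaces the two-pointer sweep over the sorted array by a per-element binary search locating the largest complement A[j] (j>i) with A[i]+A[j] < K.
import Mathlib
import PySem

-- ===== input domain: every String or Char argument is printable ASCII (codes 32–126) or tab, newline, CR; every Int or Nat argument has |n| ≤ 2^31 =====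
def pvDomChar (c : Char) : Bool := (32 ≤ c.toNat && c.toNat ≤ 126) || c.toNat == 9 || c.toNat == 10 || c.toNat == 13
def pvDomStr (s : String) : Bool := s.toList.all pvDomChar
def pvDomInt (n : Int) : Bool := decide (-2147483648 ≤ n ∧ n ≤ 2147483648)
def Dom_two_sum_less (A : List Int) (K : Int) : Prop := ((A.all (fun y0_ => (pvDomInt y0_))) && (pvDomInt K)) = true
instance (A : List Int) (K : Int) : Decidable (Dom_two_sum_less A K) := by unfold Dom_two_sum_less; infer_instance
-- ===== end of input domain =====

-- B replaces A's two-pointer sweep by a per-element binary search for the largest fitting complement;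
-- both programs sort the argument list in place in Python, the equivalence proved is about the return value.

-- ===== PORT A =====
-- the while loop: l, r two pointers over the sorted list S
def twoSumLoopA (S : List Int) (K : Int) (l r res : Int) : Int :=
  if l < r then
    if PySem.List.pyGetD S l 0 + PySem.List.pyGetD S r 0 < K then
      twoSumLoopA S K (l + 1) r (max res (PySem.List.pyGetD S l 0 + PySem.List.pyGetD S r 0))
    else
      twoSumLoopA S K l (r - 1) res
  else res
termination_by (r - l).toNat
decreasing_by all_goals omega

def two_sum_less (A : List Int) (K : Int) : Int :=
  let S := PySem.List.sorted A (fun x => x) false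
  twoSumLoopA S K 0 ((S.length : Int) - 1) (-1)

-- ===== PORT B =====
-- the inner while loop of Source B: first index in [lo, hi) whose element is ≥ x, else hi
def bsLoopB (S : List Int) (x lo hi : Int) : Int :=
  if h : lo < hi then
    if PySem.List.pyGetD S (PySem.Int.floordiv (lo + hi) 2) 0 < x then
      bsLoopB S x (PySem.Int.floordiv (lo + hi) 2 + 1) hi
    else
      bsLoopB S x lo (PySem.Int.floordiv (lo + hi) 2)
  else lo
termination_by (hi - lo).toNat
decreasing_by
  · have h1 := PySem.Int.floordiv_two_mid_bounds (le_of_lt h)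
    omega
  · have h2 := (PySem.Int.floordiv_lt_iff_lt_mul (by norm_num : (0:Int) < 2)).mpr
      (by omega : lo + hi < hi * 2)
    omega

def two_sum_less_alt (A : List Int) (K : Int) : Int :=
  let S := PySem.List.sorted A (fun x => x) false
  let n : Int := S.length
  (PySem.List.pyRange 0 n 1).foldl (fun res i =>
    let lo := bsLoopB S (K - PySem.List.pyGetD S i 0) (i + 1) n
    if i + 1 ≤ lo - 1 then
      max res (PySem.List.pyGetD S i 0 + PySem.List.pyGetD S (lo - 1) 0)
    else res) (-1)

-- ===== PRECONDITION & SPEC =====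
def Spec_two_sum_less (A : List Int) (K : Int) (out : Int) : Prop := out = two_sum_less_alt A K
instance (A : List Int) (K : Int) (out : Int) : Decidable (Spec_two_sum_less A K out) := by unfold Spec_two_sum_less; infer_instance

-- ===== CLAIM (what is proved, stated in full; the proofs are below) =====
def Claim_equal_two_sum_less : Prop := ∀ (A : List Int) (K : Int), Dom_two_sum_less A K → Spec_two_sum_less A K (two_sum_less A K)

-- ===== LEMMAS AND PROOFS =====

-- one update step of the running maximum, and its fold over a list of candidate sums
def pvStep (K res s : Int) : Int := if s < K then max res s else res
def pvVal (K res : Int) (xs : List Int) : Int := xs.foldl (pvStep K) res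

-- the sums S[l] + S[j] for j in (l, r]
def pvRow (S : List Int) (l r : Int) : List Int :=
  (PySem.List.pyRange (l + 1) (r + 1) 1).map (fun j => PySem.List.pyGetD S l 0 + PySem.List.pyGetD S j 0)

-- all sums S[i] + S[j] for l ≤ i < j ≤ r, row by row
def pvPairs (S : List Int) (l r : Int) : List Int :=
  if l < r then pvRow S l r ++ pvPairs S (l + 1) r else []
termination_by (r - l).toNat
decreasing_by omega

lemma pvVal_append (K res : Int) (xs ys : List Int) :
    pvVal K res (xs ++ ys) = pvVal K (pvVal K res xs) ys := by
  simp [pvVal, List.foldl_append]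

lemma pvVal_of_all_ge (K : Int) (xs : List Int) (h : ∀ x ∈ xs, K ≤ x) :
    ∀ res, pvVal K res xs = res := by
  induction xs with
  | nil => intro res; simp [pvVal]
  | cons a t ih =>
    intro res
    have ha : K ≤ a := h a (by simp)
    have : pvStep K res a = res := by simp [pvStep]; omega
    simp only [pvVal, List.foldl_cons, this]
    exact ih (fun x hx => h x (by simp [hx])) res

lemma pvVal_le_acc (K : Int) (xs : List Int) :
    ∀ res, (∀ x ∈ xs, x ≤ res) → pvVal K res xs = res := by
  induction xs with
  | nil => intro res _; simp [pvVal]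
  | cons a t ih =>
    intro res h
    have ha : a ≤ res := h a (by simp)
    have hs : pvStep K res a = res := by simp [pvStep]; intro _; omega
    simp only [pvVal, List.foldl_cons, hs]
    exact ih res (fun x hx => h x (by simp [hx]))

lemma pvVal_max (K s : Int) (xs : List Int)
    (hlt : ∀ x ∈ xs, x < K) (hle : ∀ x ∈ xs, x ≤ s) (hmem : s ∈ xs) :
    ∀ res, pvVal K res xs = max res s := by
  induction xs with
  | nil => simp at hmem
  | cons a t ih =>
    intro res
    have ha : a < K := hlt a (by simp)
    have hs : pvStep K res a = max res a := by simp [pvStep, ha]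
    simp only [pvVal, List.foldl_cons, hs]
    by_cases hst : s ∈ t
    · have h2 := ih (fun x hx => hlt x (by simp [hx])) (fun x hx => hle x (by simp [hx])) hst (max res a)
      simp only [pvVal] at h2 ⊢
      rw [h2]
      have has : a ≤ s := hle a (by simp)
      omega
    · have hsa : s = a := by
        rcases List.mem_cons.mp hmem with h | h
        · exact h
        · exact absurd h hst
      subst hsa
      have h2 := pvVal_le_acc K t (max res s)
        (fun x hx => le_trans (hle x (by simp [hx])) (by omega))
      simp only [pvVal] at h2 ⊢
      rw [h2]

lemma pvPairs_of_ge (S : List Int) {l r : Int} (h : r ≤ l) : pvPairs S l r = [] := by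
  rw [pvPairs]; simp [show ¬ l < r by omega]

lemma pvPairs_of_lt (S : List Int) {l r : Int} (h : l < r) :
    pvPairs S l r = pvRow S l r ++ pvPairs S (l + 1) r := by
  rw [pvPairs]; simp [h]

-- sorted-list index monotonicity, in pyGetD form
lemma pvMono (S : List Int) (hp : S.Pairwise (· ≤ ·)) {p q : Int}
    (h0 : 0 ≤ p) (hpq : p ≤ q) (hq : q < (S.length : Int)) :
    PySem.List.pyGetD S p 0 ≤ PySem.List.pyGetD S q 0 := by
  have hp' : p < (S.length : Int) := lt_of_le_of_lt hpq hq
  rw [PySem.List.pyGetD_eq_getElem S 0 h0 hp', PySem.List.pyGetD_eq_getElem S 0 (by omega : (0:Int) ≤ q) hq]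
  rcases eq_or_lt_of_le hpq with h | h
  · subst h; exact le_refl _
  · exact (List.pairwise_iff_getElem.mp hp) p.toNat q.toNat (by omega) (by omega) (by omega)

-- dropping the last column: if every sum with the fixed right index r is ≥ K it changes no value
lemma pvDropCol (S : List Int) (K : Int) :
    ∀ m (l r : Int), (r - l).toNat ≤ m → 0 ≤ l → r < (S.length : Int) →
    (∀ i, l ≤ i → i < r → K ≤ PySem.List.pyGetD S i 0 + PySem.List.pyGetD S r 0) →
    ∀ res, pvVal K res (pvPairs S l r) = pvVal K res (pvPairs S l (r - 1)) := by
  intro m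
  induction m with
  | zero =>
    intro l r hm hl hr hge res
    rw [pvPairs_of_ge S (by omega), pvPairs_of_ge S (by omega)]
  | succ m ih =>
    intro l r hm hl hr hge res
    by_cases hlr : l < r
    · rw [pvPairs_of_lt S hlr]
      have hrow : pvRow S l r = pvRow S l (r - 1) ++ [PySem.List.pyGetD S l 0 + PySem.List.pyGetD S r 0] := by
        unfold pvRow
        rw [show r + 1 = r + 1 from rfl, show (r - 1 : Int) + 1 = r by ring]
        rw [PySem.List.pyRange_one_succ_right (by omega)]
        simp
      rw [hrow, List.append_assoc, pvVal_append]
      have hK : K ≤ PySem.List.pyGetD S l 0 + PySem.List.pyGetD S r 0 := hge l (le_refl l) hlr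
      have hsingle : pvVal K (pvVal K res (pvRow S l (r - 1)))
          ([PySem.List.pyGetD S l 0 + PySem.List.pyGetD S r 0] ++ pvPairs S (l + 1) r)
          = pvVal K (pvVal K res (pvRow S l (r - 1))) (pvPairs S (l + 1) r) := by
        rw [pvVal_append]
        congr 1
        exact pvVal_of_all_ge K _ (by simpa using hK) _
      rw [hsingle]
      have ihr := ih (l + 1) r (by omega) (by omega) hr
        (fun i hi1 hi2 => hge i (by omega) hi2) (pvVal K res (pvRow S l (r - 1)))
      rw [ihr]
      by_cases hlr1 : l < r - 1
      · rw [pvPairs_of_lt S hlr1, pvVal_append]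
      · rw [pvPairs_of_ge S (by omega : r - 1 ≤ l), pvPairs_of_ge S (by omega : r - 1 ≤ l + 1)]
        have : pvRow S l (r - 1) = [] := by
          unfold pvRow
          rw [PySem.List.pyRange_one_eq_nil (by omega)]
          simp
        rw [this]
        simp [pvVal]
    · rw [pvPairs_of_ge S (by omega), pvPairs_of_ge S (by omega)]

-- the two-pointer loop computes the running maximum over all remaining pairs
lemma pvLoopEq (S : List Int) (K : Int) (hp : S.Pairwise (· ≤ ·)) :
    ∀ m (l r res : Int), (r - l).toNat ≤ m → 0 ≤ l → r ≤ (S.length : Int) - 1 →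
    twoSumLoopA S K l r res = pvVal K res (pvPairs S l r) := by
  intro m
  induction m with
  | zero =>
    intro l r res hm hl hr
    rw [twoSumLoopA, pvPairs_of_ge S (by omega)]
    simp [show ¬ l < r by omega, pvVal]
  | succ m ih =>
    intro l r res hm hl hr
    by_cases hlr : l < r
    · rw [twoSumLoopA]
      simp only [hlr, if_true]
      set s := PySem.List.pyGetD S l 0 + PySem.List.pyGetD S r 0 with hs
      by_cases hsk : s < K
      · simp only [hsk, if_true]
        rw [ih (l + 1) r (max res s) (by omega) (by omega) hr]
        rw [pvPairs_of_lt S hlr, pvVal_append]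
        congr 1
        refine (pvVal_max K s (pvRow S l r) ?_ ?_ ?_ res).symm
        · intro x hx
          rcases List.mem_map.mp hx with ⟨j, hj, rfl⟩
          have hjb := (PySem.List.mem_pyRange_one).mp hj
          have : PySem.List.pyGetD S j 0 ≤ PySem.List.pyGetD S r 0 :=
            pvMono S hp (by omega) (by omega) (by omega)
          omega
        · intro x hx
          rcases List.mem_map.mp hx with ⟨j, hj, rfl⟩
          have hjb := (PySem.List.mem_pyRange_one).mp hj
          have : PySem.List.pyGetD S j 0 ≤ PySem.List.pyGetD S r 0 :=
            pvMono S hp (by omega) (by omega) (by omega)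
          omega
        · unfold pvRow
          refine List.mem_map.mpr ⟨r, ?_, rfl⟩
          exact (PySem.List.mem_pyRange_one).mpr (by omega)
      · simp only [hsk, if_false]
        rw [ih l (r - 1) res (by omega) hl (by omega)]
        refine (pvDropCol S K ((r - l).toNat) l r (le_refl _) hl (by omega) ?_ res).symm
        intro i hi1 hi2
        have : PySem.List.pyGetD S l 0 ≤ PySem.List.pyGetD S i 0 :=
          pvMono S hp hl hi1 (by omega)
        omega
    · rw [twoSumLoopA, pvPairs_of_ge S (by omega)]
      simp [show ¬ l < r by omega, pvVal]

-- the binary-search loop of B finds the first index in [lo, hi) whose element is ≥ x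
lemma pvBsSpec (S : List Int) (hp : S.Pairwise (· ≤ ·)) (x : Int) :
    ∀ m (lo hi : Int), (hi - lo).toNat ≤ m → 0 ≤ lo → lo ≤ hi → hi ≤ (S.length : Int) →
    lo ≤ bsLoopB S x lo hi ∧ bsLoopB S x lo hi ≤ hi ∧
    (∀ j, lo ≤ j → j < bsLoopB S x lo hi → PySem.List.pyGetD S j 0 < x) ∧
    (∀ j, bsLoopB S x lo hi ≤ j → j < hi → x ≤ PySem.List.pyGetD S j 0) := by
  intro m
  induction m with
  | zero =>
    intro lo hi hm h0 hlh hhn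
    have heq : lo = hi := by omega
    rw [bsLoopB]
    simp only [show ¬ lo < hi by omega, dif_neg, not_false_iff]
    exact ⟨le_refl _, by omega, fun j h1 h2 => by omega, fun j h1 h2 => by omega⟩
  | succ m ih =>
    intro lo hi hm h0 hlh hhn
    by_cases hlt : lo < hi
    · rw [bsLoopB]
      simp only [hlt, dif_pos]
      have hmb := PySem.Int.floordiv_two_mid_bounds (le_of_lt hlt)
      have hmlt : PySem.Int.floordiv (lo + hi) 2 < hi :=
        (PySem.Int.floordiv_lt_iff_lt_mul (by norm_num : (0:Int) < 2)).mpr (by omega)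
      set mid := PySem.Int.floordiv (lo + hi) 2 with hmid
      by_cases hc : PySem.List.pyGetD S mid 0 < x
      · simp only [hc, if_true]
        obtain ⟨a, b, c, d⟩ := ih (mid + 1) hi (by omega) (by omega) (by omega) hhn
        refine ⟨by omega, b, ?_, d⟩
        intro j h1 h2
        by_cases hj : j ≤ mid
        · have := pvMono S hp (q := mid) (by omega : (0:Int) ≤ j) hj (by omega)
          omega
        · exact c j (by omega) h2
      · simp only [hc, if_false]
        have hx : x ≤ PySem.List.pyGetD S mid 0 := not_lt.mp hc
        obtain ⟨a, b, c, d⟩ := ih lo mid (by omega) h0 (by omega) (by omega)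
        refine ⟨a, by omega, c, ?_⟩
        intro j h1 h2
        by_cases hj : mid ≤ j
        · have := pvMono S hp (p := mid) (by omega) hj (by omega)
          omega
        · exact d j h1 (by omega)
    · rw [bsLoopB]
      simp only [hlt, dif_neg, not_false_iff]
      exact ⟨le_refl _, hlh, fun j h1 h2 => by omega, fun j h1 h2 => by omega⟩

-- one outer-loop step of B equals the running maximum over row i
lemma pvRowStep (S : List Int) (K : Int) (hp : S.Pairwise (· ≤ ·)) (i : Int)
    (h0 : 0 ≤ i) (hn : i < (S.length : Int)) (res : Int) :
    (if i + 1 ≤ bsLoopB S (K - PySem.List.pyGetD S i 0) (i + 1) (S.length : Int) - 1 then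
       max res (PySem.List.pyGetD S i 0 +
         PySem.List.pyGetD S (bsLoopB S (K - PySem.List.pyGetD S i 0) (i + 1) (S.length : Int) - 1) 0)
     else res)
    = pvVal K res (pvRow S i ((S.length : Int) - 1)) := by
  set n := (S.length : Int) with hndef
  set x := K - PySem.List.pyGetD S i 0 with hxdef
  set p := bsLoopB S x (i + 1) n with hpdef
  obtain ⟨hp1, hp2, hlt, hge⟩ :=
    pvBsSpec S hp x ((n - (i + 1)).toNat) (i + 1) n (le_refl _) (by omega) (by omega) (le_refl _)
  have hrow : pvRow S i (n - 1)
      = (PySem.List.pyRange (i + 1) p 1).map (fun j => PySem.List.pyGetD S i 0 + PySem.List.pyGetD S j 0)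
        ++ (PySem.List.pyRange p n 1).map (fun j => PySem.List.pyGetD S i 0 + PySem.List.pyGetD S j 0) := by
    unfold pvRow
    rw [show n - 1 + 1 = n by ring, PySem.List.pyRange_one_append (i + 1) p n hp1 hp2, List.map_append]
  rw [hrow, pvVal_append]
  have htail : ∀ acc, pvVal K acc
      ((PySem.List.pyRange p n 1).map (fun j => PySem.List.pyGetD S i 0 + PySem.List.pyGetD S j 0)) = acc := by
    intro acc
    refine pvVal_of_all_ge K _ ?_ acc
    intro y hy
    rcases List.mem_map.mp hy with ⟨j, hj, rfl⟩
    have hjb := (PySem.List.mem_pyRange_one).mp hj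
    have := hge j hjb.1 hjb.2
    omega
  rw [htail]
  by_cases hcase : i + 1 ≤ p - 1
  · simp only [hcase, if_true]
    refine (pvVal_max K (PySem.List.pyGetD S i 0 + PySem.List.pyGetD S (p - 1) 0) _ ?_ ?_ ?_ res).symm
    · intro y hy
      rcases List.mem_map.mp hy with ⟨j, hj, rfl⟩
      have hjb := (PySem.List.mem_pyRange_one).mp hj
      have := hlt j hjb.1 hjb.2
      omega
    · intro y hy
      rcases List.mem_map.mp hy with ⟨j, hj, rfl⟩
      have hjb := (PySem.List.mem_pyRange_one).mp hj
      have := pvMono S hp (p := j) (q := p - 1) (by omega) (by omega) (by omega)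
      omega
    · refine List.mem_map.mpr ⟨p - 1, ?_, rfl⟩
      exact (PySem.List.mem_pyRange_one).mpr (by omega)
  · simp only [hcase, if_false]
    have hpe : p = i + 1 := by omega
    rw [hpe, PySem.List.pyRange_one_eq_nil (le_refl _)]
    simp [pvVal]

-- B's outer fold, row by row, equals the running maximum over the flattened rows
lemma pvFoldFlat (K : Int) (g : Int → List Int) :
    ∀ (xs : List Int) (res : Int),
      xs.foldl (fun res i => pvVal K res (g i)) res = pvVal K res (xs.flatMap g) := by
  intro xs
  induction xs with
  | nil => intro res; simp [pvVal]
  | cons a t ih =>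
    intro res
    simp only [List.foldl_cons, List.flatMap_cons, pvVal_append]
    exact ih (pvVal K res (g a))

lemma pvFlatRows (S : List Int) :
    ∀ m (l : Int), ((S.length : Int) - l).toNat ≤ m → 0 ≤ l →
    (PySem.List.pyRange l (S.length : Int) 1).flatMap (fun i => pvRow S i ((S.length : Int) - 1))
      = pvPairs S l ((S.length : Int) - 1) := by
  intro m
  induction m with
  | zero =>
    intro l hm hl
    rw [PySem.List.pyRange_one_eq_nil (by omega), pvPairs_of_ge S (by omega)]
    simp
  | succ m ih =>
    intro l hm hl
    set n : Int := (S.length : Int) with hn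
    by_cases hln : l < n
    · rw [PySem.List.pyRange_one_cons hln]
      simp only [List.flatMap_cons]
      rw [ih (l + 1) (by omega) (by omega)]
      by_cases hln1 : l < n - 1
      · rw [pvPairs_of_lt S hln1]
      · rw [pvPairs_of_ge S (by omega : n - 1 ≤ l), pvPairs_of_ge S (by omega : n - 1 ≤ l + 1)]
        have : pvRow S l (n - 1) = [] := by
          unfold pvRow
          rw [show (n - 1 : Int) + 1 = n by ring, PySem.List.pyRange_one_eq_nil (by omega)]
          simp
        simp [this]
    · rw [PySem.List.pyRange_one_eq_nil (by omega), pvPairs_of_ge S (by omega)]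
      simp

-- ===== VERDICT (by name: the statement is the Claim_ definition above) =====
theorem two_sum_less_spec : Claim_equal_two_sum_less := by
  intro A K _
  unfold Spec_two_sum_less two_sum_less two_sum_less_alt
  set S := PySem.List.sorted A (fun x => x) false with hS
  have hp : S.Pairwise (· ≤ ·) := by
    simpa using PySem.List.sorted_pairwise A (fun x => x)
  have hB : (PySem.List.pyRange 0 (S.length : Int) 1).foldl (fun res i =>
      let lo := bsLoopB S (K - PySem.List.pyGetD S i 0) (i + 1) (S.length : Int)
      if i + 1 ≤ lo - 1 then
        max res (PySem.List.pyGetD S i 0 + PySem.List.pyGetD S (lo - 1) 0)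
      else res) (-1)
      = pvVal K (-1) (pvPairs S 0 ((S.length : Int) - 1)) := by
    have h1 : (PySem.List.pyRange 0 (S.length : Int) 1).foldl (fun res i =>
        let lo := bsLoopB S (K - PySem.List.pyGetD S i 0) (i + 1) (S.length : Int)
        if i + 1 ≤ lo - 1 then
          max res (PySem.List.pyGetD S i 0 + PySem.List.pyGetD S (lo - 1) 0)
        else res) (-1)
        = (PySem.List.pyRange 0 (S.length : Int) 1).foldl (fun res i =>
            pvVal K res (pvRow S i ((S.length : Int) - 1))) (-1) := by
      refine PySem.List.foldl_congr_mem _ _ _ _ (fun acc x hx => ?_)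
      have hxb := (PySem.List.mem_pyRange_one).mp hx
      exact pvRowStep S K hp x hxb.1 hxb.2 acc
    rw [h1, pvFoldFlat K _ _ (-1),
      pvFlatRows S ((S.length : Int) - 0).toNat 0 (le_refl _) (le_refl 0)]
  rw [hB]
  exact pvLoopEq S K hp (((S.length : Int) - 1) - 0).toNat 0 ((S.length : Int) - 1) (-1)
    (le_refl _) (le_refl 0) (le_refl _)
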